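-- pv_equiv track=rewrite | github.com/VSGroupe/Api_Performance_RSE_SIFCA | utils.py | formuleDernierMois
-- ===== SOURCE A (Python) =====
-- def formuleDernierMois(dataRow) :
--     l = []
--     for data in dataRow :
--         if data != None :
--             l.append(data)
--     if l != [] :
--         return l[-1]
--     return None
-- ===== SOURCE B (Python) =====
-- def formuleDernierMois(dataRow):
--     # backward scan: first non-None from the end, no intermediate list
--     for data in reversed(list(dataRow)):
--         if data != None:
--             return data
--     return None
-- ===== Notes on version B (the rewrite author's own statement) =====
-- stated objective: simpler
-- what changed: B scans the sequence backwards and returns the first non-None element found, instead of building a filtered list and indexing its last element.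
import Mathlib
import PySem

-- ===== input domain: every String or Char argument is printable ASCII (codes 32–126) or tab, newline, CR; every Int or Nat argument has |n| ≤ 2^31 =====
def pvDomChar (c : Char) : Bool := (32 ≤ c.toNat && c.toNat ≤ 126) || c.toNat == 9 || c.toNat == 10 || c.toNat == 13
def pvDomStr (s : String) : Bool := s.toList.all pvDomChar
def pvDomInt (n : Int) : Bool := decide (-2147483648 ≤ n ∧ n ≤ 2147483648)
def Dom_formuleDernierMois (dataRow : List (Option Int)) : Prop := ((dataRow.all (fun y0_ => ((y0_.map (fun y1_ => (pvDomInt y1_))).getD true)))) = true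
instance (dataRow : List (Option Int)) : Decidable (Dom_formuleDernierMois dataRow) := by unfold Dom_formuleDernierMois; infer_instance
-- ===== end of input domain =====

-- B replaces A's filtered intermediate list + last-element indexing by a backward
-- scan returning the first non-None element (objective: simpler).

-- ===== PORT A =====
-- l = []; for data in dataRow: if data != None: l.append(data); if l != []: return l[-1]; return None
def formuleDernierMois (dataRow : List (Option Int)) : Option Int :=
  let l := dataRow.foldl (fun acc data => if data ≠ none then acc ++ [data] else acc) []
  if l ≠ [] then
    -- l[-1] on a nonempty list is its last element
    l.getLast?.getD none
  else
    none

-- ===== PORT B =====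
-- first non-None element of the reversed list, else None
def pvFirstSome : List (Option Int) → Option Int
  | [] => none
  | data :: rest => if data ≠ none then data else pvFirstSome rest

def formuleDernierMois_alt (dataRow : List (Option Int)) : Option Int :=
  pvFirstSome dataRow.reverse

-- ===== PRECONDITION & SPEC =====
def Spec_formuleDernierMois (dataRow : List (Option Int)) (out : Option Int) : Prop := out = formuleDernierMois_alt dataRow
instance (dataRow : List (Option Int)) (out : Option Int) : Decidable (Spec_formuleDernierMois dataRow out) := by unfold Spec_formuleDernierMois; infer_instance

-- ===== CLAIM (what is proved, stated in full; the proofs are below) =====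
def Claim_equal_formuleDernierMois : Prop := ∀ (dataRow : List (Option Int)), Dom_formuleDernierMois dataRow → Spec_formuleDernierMois dataRow (formuleDernierMois dataRow)

-- ===== LEMMAS AND PROOFS =====
theorem pvEq (dataRow : List (Option Int)) :
    formuleDernierMois dataRow = formuleDernierMois_alt dataRow := by
  induction dataRow using List.reverseRecOn with
  | nil => rfl
  | append_singleton xs x ih =>
    simp only [formuleDernierMois, formuleDernierMois_alt,
      PySem.List.foldl_append_ite_eq_filter] at ih ⊢
    rw [List.filter_append, List.reverse_append]
    by_cases hx : x = none
    · subst hx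
      simpa [pvFirstSome] using ih
    · simp [pvFirstSome, hx, List.getLast?_append]

-- ===== VERDICT (by name: the statement is the Claim_ definition above) =====
theorem formuleDernierMois_spec : Claim_equal_formuleDernierMois := by
  intro dataRow _
  unfold Spec_formuleDernierMois
  exact pvEq dataRow
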